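-- pv_equiv track=rewrite | github.com/pypi-data/pypi-mirror-368 | packages/cc-validator/cc_validator-2.2.0.tar.gz/cc_validator-2.2.0/cc_validator/security_validator.py | _is_allowed_file_on_main
-- ===== SOURCE A (Python) =====
-- def _is_allowed_file_on_main(file_path: str) -> bool:
--     """Check if file is allowed to be modified on protected branches"""
--     allowed_files = [
--         "README.md",
--         "CHANGELOG.md",
--         ".gitignore",
--         "LICENSE",
--         "CLAUDE.md",
--     ]
--     allowed_dirs = ["docs/", ".github/"]
--
--     for allowed_file in allowed_files:
--         if file_path == allowed_file or file_path.endswith(f"/{allowed_file}"):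
--             return True
--
--     for allowed_dir in allowed_dirs:
--         if file_path.startswith(allowed_dir):
--             return True
--
--     return False
-- ===== SOURCE B (Python) =====
-- def _is_allowed_file_on_main(file_path: str) -> bool:
--     """Check if file is allowed to be modified on protected branches"""
--     names = ("README.md", "CHANGELOG.md", ".gitignore", "LICENSE", "CLAUDE.md")
--     i = file_path.find('/')
--     if i < 0:
--         # a bare filename: allowed iff it is one of the allowed files
--         return file_path in names
--     # a path with directories: allowed if rooted in an allowed directory,
--     # otherwise recurse towards the last segment
--     if file_path[:i] in ("docs", ".github"):
--         return True
--     return _last_segment_in(file_path[i + 1:], names)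
--
--
-- def _last_segment_in(rest: str, names) -> bool:
--     i = rest.find('/')
--     if i < 0:
--         return rest in names
--     return _last_segment_in(rest[i + 1:], names)
-- ===== Notes on version B (the rewrite author's own statement) =====
-- stated objective: alternative
-- what changed: Replaces A's two pattern loops (per-name exact/endswith tests, then per-dir startswith) with a single forward recursion that splits the path at its first slash: a slash-free path is tested against the name tuple directly, a rooted path first checks its leading segment against the allowed directory names and otherwise recurses segment by segment towards the last one.
import Mathlib
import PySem

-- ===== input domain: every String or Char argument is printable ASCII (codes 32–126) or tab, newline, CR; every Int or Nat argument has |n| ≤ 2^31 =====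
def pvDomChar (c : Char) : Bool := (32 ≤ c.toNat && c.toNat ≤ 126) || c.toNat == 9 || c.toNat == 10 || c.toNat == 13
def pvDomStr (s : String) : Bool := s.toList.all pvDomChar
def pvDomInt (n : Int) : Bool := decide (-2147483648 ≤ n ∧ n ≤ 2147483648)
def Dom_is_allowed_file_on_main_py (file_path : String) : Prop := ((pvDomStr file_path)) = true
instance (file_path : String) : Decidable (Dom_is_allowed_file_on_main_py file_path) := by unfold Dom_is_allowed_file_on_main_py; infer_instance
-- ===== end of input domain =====

-- B replaces A's two pattern loops (per-name exact/endswith tests, then per-dir startswith)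
-- by a single forward recursion splitting the path at its first '/' (objective: alternative).


-- ===== PORT A =====
-- for-loops with early `return True` → List.any over the same lists, same branch order
def is_allowed_file_on_main_py (file_path : String) : Bool :=
  let allowed_files : List String := ["README.md", "CHANGELOG.md", ".gitignore", "LICENSE", "CLAUDE.md"]
  let allowed_dirs : List String := ["docs/", ".github/"]
  if allowed_files.any (fun allowed_file =>
      file_path == allowed_file || PySem.Str.endswith file_path ("/" ++ allowed_file)) then
    true
  else if allowed_dirs.any (fun allowed_dir => PySem.Str.startswith file_path allowed_dir) then
    true
  else
    false

-- ===== PORT B =====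
-- Source B's `rest.find('/')` + slices `rest[:i]` / `rest[i+1:]` are ported by hand as the
-- split of the character list at its first '/' (takeWhile / dropWhile, exact on all strings);
-- `i < 0` is the case where no '/' occurs, i.e. dropWhile (≠ '/') = [].
def pvLastSegmentIn (rest : List Char) (names : List String) : Bool :=
  match h : rest.dropWhile (fun c => c ≠ '/') with
  | [] => names.contains (String.ofList rest)
  | _ :: tl => pvLastSegmentIn tl names
termination_by rest.length
decreasing_by
  have hle := List.length_dropWhile_le (fun c => decide (c ≠ '/')) rest
  rw [h] at hle; simp at hle; omega

def is_allowed_file_on_main_py_alt (file_path : String) : Bool :=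
  let names : List String := ["README.md", "CHANGELOG.md", ".gitignore", "LICENSE", "CLAUDE.md"]
  let cs := file_path.toList
  match cs.dropWhile (fun c => c ≠ '/') with
  | [] => names.contains file_path
  | _ :: tl =>
    if ["docs", ".github"].contains (String.ofList (cs.takeWhile (fun c => c ≠ '/'))) then
      true
    else
      pvLastSegmentIn tl names

-- ===== PRECONDITION & SPEC =====
def Spec_is_allowed_file_on_main_py (file_path : String) (out : Bool) : Prop := out = is_allowed_file_on_main_py_alt file_path
instance (file_path : String) (out : Bool) : Decidable (Spec_is_allowed_file_on_main_py file_path out) := by unfold Spec_is_allowed_file_on_main_py; infer_instance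

-- ===== CLAIM (what is proved, stated in full; the proofs are below) =====
def Claim_equal_is_allowed_file_on_main_py : Prop := ∀ (file_path : String), Dom_is_allowed_file_on_main_py file_path → Spec_is_allowed_file_on_main_py file_path (is_allowed_file_on_main_py file_path)

-- ===== LEMMAS AND PROOFS =====

-- the last path component, as A's endswith scan determines it (proof-side helper)
def pvBasename (file_path : String) : String :=
  String.ofList ((file_path.toList.reverse.takeWhile (fun c => c ≠ '/')).reverse)

-- takeWhile (≠ '/') never looks past an explicit separator
theorem pv_tw_sep (p : Char → Bool) (hp : p '/' = false) (a b : List Char) :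
    (a ++ '/' :: b).takeWhile p = a.takeWhile p := by
  induction a with
  | nil => simp [hp]
  | cons c cs ih => rw [List.cons_append, List.takeWhile_cons, List.takeWhile_cons]; cases p c <;> simp [ih]

-- Core fact, phrased over the reversed character list: for a slash-free name Y,
-- "the reversed string is Y, or Y ++ ['/'] is a prefix of it" is exactly
-- "the segment before the first '/' of the reversed string equals Y".
theorem pv_takeWhile_rev (rs Y : List Char) (hY : '/' ∉ Y) :
    (rs = Y ∨ (Y ++ ['/']) <+: rs) ↔ rs.takeWhile (fun c => c ≠ '/') = Y := by
  induction rs generalizing Y with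
  | nil =>
    simp only [List.takeWhile_nil]
    constructor
    · rintro (h | ⟨t, ht⟩)
      · exact h
      · simp at ht
    · exact Or.inl
  | cons c rs ih =>
    by_cases hc : c = '/'
    · subst hc
      rw [show List.takeWhile (fun c => c ≠ '/') ('/' :: rs) = [] by simp]
      constructor
      · rintro (h | ⟨t, ht⟩)
        · exact absurd (h ▸ List.mem_cons_self) hY
        · cases Y with
          | nil => rfl
          | cons y ys =>
            simp only [List.cons_append, List.cons_append, List.cons.injEq] at ht
            exact absurd (ht.1 ▸ List.mem_cons_self) hY
      · rintro rfl
        exact Or.inr ⟨rs, rfl⟩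
    · rw [show List.takeWhile (fun c => c ≠ '/') (c :: rs)
            = c :: List.takeWhile (fun c => c ≠ '/') rs by simp [hc]]
      cases Y with
      | nil =>
        constructor
        · rintro (h | ⟨t, ht⟩)
          · exact absurd h (by simp)
          · simp only [List.nil_append, List.cons_append, List.cons.injEq] at ht
            exact absurd ht.1.symm hc
        · intro h; exact absurd h (by simp)
      | cons y ys =>
        have hys : '/' ∉ ys := fun h => hY (List.mem_cons_of_mem _ h)
        constructor
        · rintro (h | ⟨t, ht⟩)
          · simp only [List.cons.injEq] at h
            rw [h.1, ← (ih ys hys).mp (Or.inl h.2)]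
          · simp only [List.cons_append, List.cons_append, List.cons.injEq] at ht
            rw [ht.1, ← (ih ys hys).mp (Or.inr ⟨t, ht.2⟩)]
        · intro h
          simp only [List.cons.injEq] at h
          rcases (ih ys hys).mpr h.2 with h' | ⟨t, ht⟩
          · exact Or.inl (by rw [h.1, h'])
          · exact Or.inr ⟨t, by simp [h.1, ← ht]⟩

-- Per-name bridge on strings: A's clause for a slash-free name f ↔ the basename equals f.
theorem pv_clause (file_path f : String) (hf : '/' ∉ f.toList) :
    (file_path == f || PySem.Str.endswith file_path ("/" ++ f))
      = (pvBasename file_path == f) := by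
  have key := pv_takeWhile_rev file_path.toList.reverse f.toList.reverse (by simpa using hf)
  rw [Bool.eq_iff_iff]
  simp only [Bool.or_eq_true, beq_iff_eq, PySem.Str.endswith_eq, PySem.Chars.endswith_iff]
  unfold pvBasename
  have hbn : (String.ofList ((file_path.toList.reverse.takeWhile (fun c => c ≠ '/')).reverse) = f)
      ↔ file_path.toList.reverse.takeWhile (fun c => c ≠ '/') = f.toList.reverse := by
    constructor
    · intro h
      have := congrArg String.toList h
      simp only [String.toList_ofList] at this
      simpa using congrArg List.reverse this
    · intro h
      rw [h]
      simp
  rw [hbn, ← key]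
  have hsuf : ("/" ++ f).toList <:+ file_path.toList
      ↔ (f.toList.reverse ++ ['/']) <+: file_path.toList.reverse := by
    rw [← List.reverse_prefix]
    simp
  have heqs : (file_path = f) ↔ file_path.toList.reverse = f.toList.reverse := by
    rw [List.reverse_inj]
    exact ⟨fun h => h ▸ rfl, fun h => String.ext h⟩
  rw [hsuf, heqs]

-- B's recursion computes exactly "basename ∈ names"
theorem pv_lastSegmentIn_eq (rest : List Char) (names : List String) :
    pvLastSegmentIn rest names
      = names.contains (String.ofList ((rest.reverse.takeWhile (fun c => c ≠ '/')).reverse)) := by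
  induction rest using pvLastSegmentIn.induct with
  | case1 rest h =>
    rw [pvLastSegmentIn, h]
    have hall : ∀ x ∈ rest, (fun c => decide (c ≠ '/')) x := List.dropWhile_eq_nil_iff.mp h
    have : rest.reverse.takeWhile (fun c => c ≠ '/') = rest.reverse :=
      List.takeWhile_eq_self_iff.mpr (fun x hx => hall x (List.mem_reverse.mp hx))
    rw [this, List.reverse_reverse]
  | case2 rest d tl h ih =>
    rw [pvLastSegmentIn, h]
    dsimp only
    rw [ih]
    have hd : (fun c => decide (c ≠ '/')) d = false := by
      have hne : rest.dropWhile (fun c => decide (c ≠ '/')) ≠ [] := by rw [h]; exact List.cons_ne_nil _ _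
      have h2 := List.head_dropWhile_not (fun c => decide (c ≠ '/')) hne
      have h4 : (rest.dropWhile (fun c => decide (c ≠ '/'))).head? = some d := by rw [h]; rfl
      rw [List.head?_eq_some_head hne, Option.some.injEq] at h4
      rwa [h4] at h2
    have hd' : d = '/' := by simpa using hd
    have hsplit : rest = rest.takeWhile (fun c => decide (c ≠ '/')) ++ '/' :: tl := by
      conv_lhs => rw [← List.takeWhile_append_dropWhile (p := fun c => decide (c ≠ '/')) (l := rest)]
      rw [h, hd']
    have : rest.reverse.takeWhile (fun c => c ≠ '/') = tl.reverse.takeWhile (fun c => c ≠ '/') := by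
      conv_lhs => rw [hsplit]
      rw [List.reverse_append, List.reverse_cons, List.append_assoc]
      exact pv_tw_sep _ (by simp) _ _
    rw [this]

-- splitting A's path at the first '/': a prefix "w/" matches iff the first segment is w
theorem pv_pfx_sep (w a b : List Char) (hw : '/' ∉ w) (ha : '/' ∉ a) :
    (w ++ ['/']) <+: (a ++ '/' :: b) ↔ a = w := by
  constructor
  · rintro ⟨t, ht⟩
    have : a ++ '/' :: b = w ++ '/' :: t := by simpa using ht.symm
    have h2 := congrArg (List.takeWhile (fun c => decide (c ≠ '/'))) this
    rw [pv_tw_sep _ (by simp) a b, pv_tw_sep _ (by simp) w t,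
        List.takeWhile_eq_self_iff.mpr (fun x hx => by
          simp only [ne_eq, decide_eq_true_eq]; exact fun hh => ha (hh ▸ hx)),
        List.takeWhile_eq_self_iff.mpr (fun x hx => by
          simp only [ne_eq, decide_eq_true_eq]; exact fun hh => hw (hh ▸ hx))] at h2
    exact h2
  · rintro rfl
    exact ⟨b, by simp⟩

-- List.contains on the two literal name lists, unfolded to the `==`-or chain
theorem pv_contains5 (x : String) :
    (["README.md", "CHANGELOG.md", ".gitignore", "LICENSE", "CLAUDE.md"] : List String).contains x
      = (x == "README.md" || (x == "CHANGELOG.md" || (x == ".gitignore"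
          || (x == "LICENSE" || (x == "CLAUDE.md" || false))))) := by
  simp only [List.contains_cons, List.contains_nil]

theorem pv_contains2 (x : String) :
    (["docs", ".github"] : List String).contains x
      = (x == "docs" || (x == ".github" || false)) := by
  simp only [List.contains_cons, List.contains_nil]

-- ===== VERDICT (by name: the statement is the Claim_ definition above) =====
theorem is_allowed_file_on_main_py_spec : Claim_equal_is_allowed_file_on_main_py := by
  intro fp _
  unfold Spec_is_allowed_file_on_main_py is_allowed_file_on_main_py is_allowed_file_on_main_py_alt
  simp only [List.any_cons, List.any_nil]
  rw [pv_clause fp "README.md" (by decide),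
      pv_clause fp "CHANGELOG.md" (by decide),
      pv_clause fp ".gitignore" (by decide),
      pv_clause fp "LICENSE" (by decide),
      pv_clause fp "CLAUDE.md" (by decide)]
  cases h : fp.toList.dropWhile (fun c => c ≠ '/') with
  | nil =>
    dsimp only
    -- no '/' in the path: both directory prefixes fail, the basename is the whole path
    have hall : ∀ x ∈ fp.toList, (fun c => decide (c ≠ '/')) x := List.dropWhile_eq_nil_iff.mp h
    have hno : '/' ∉ fp.toList := fun hm => by simpa using hall _ hm
    have hbn : pvBasename fp = fp := by
      unfold pvBasename
      rw [List.takeWhile_eq_self_iff.mpr (fun x hx => hall x (List.mem_reverse.mp hx)),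
          List.reverse_reverse, String.ofList_toList]
    have hs1 : PySem.Str.startswith fp "docs/" = false := by
      rw [Bool.eq_false_iff]
      intro hs
      rw [PySem.Str.startswith_eq, PySem.Chars.startswith_iff] at hs
      exact hno (hs.mem (by decide))
    have hs2 : PySem.Str.startswith fp ".github/" = false := by
      rw [Bool.eq_false_iff]
      intro hs
      rw [PySem.Str.startswith_eq, PySem.Chars.startswith_iff] at hs
      exact hno (hs.mem (by decide))
    simp only [hbn, hs1, hs2]
    rw [pv_contains5]
    generalize (fp == "README.md") = b1
    generalize (fp == "CHANGELOG.md") = b2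
    generalize (fp == ".gitignore") = b3
    generalize (fp == "LICENSE") = b4
    generalize (fp == "CLAUDE.md") = b5
    revert b1 b2 b3 b4 b5
    decide
  | cons d tl =>
    dsimp only
    -- the path is seg ++ '/' :: tl with seg slash-free
    have hd : (fun c => decide (c ≠ '/')) d = false := by
      have hne : fp.toList.dropWhile (fun c => decide (c ≠ '/')) ≠ [] := by rw [h]; exact List.cons_ne_nil _ _
      have h2 := List.head_dropWhile_not (fun c => decide (c ≠ '/')) hne
      have h4 : (fp.toList.dropWhile (fun c => decide (c ≠ '/'))).head? = some d := by rw [h]; rfl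
      rw [List.head?_eq_some_head hne, Option.some.injEq] at h4
      rwa [h4] at h2
    have hd' : d = '/' := by simpa using hd
    have hsplit : fp.toList = fp.toList.takeWhile (fun c => decide (c ≠ '/')) ++ '/' :: tl := by
      conv_lhs => rw [← List.takeWhile_append_dropWhile (p := fun c => decide (c ≠ '/')) (l := fp.toList)]
      rw [h, hd']
    have hseg : '/' ∉ fp.toList.takeWhile (fun c => decide (c ≠ '/')) := by
      intro hm
      simpa using List.mem_takeWhile_imp hm
    -- startswith "w/" ↔ first segment = w
    have hsw : ∀ (w : String), '/' ∉ w.toList →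
        PySem.Str.startswith fp (w ++ "/")
          = (String.ofList (fp.toList.takeWhile (fun c => c ≠ '/')) == w) := by
      intro w hwns
      rw [Bool.eq_iff_iff]
      rw [PySem.Str.startswith_eq, PySem.Chars.startswith_iff]
      have hlist : (w ++ "/").toList = w.toList ++ ['/'] := by simp
      rw [hlist]
      conv_lhs => rw [hsplit]
      rw [pv_pfx_sep _ _ _ hwns hseg]
      constructor
      · intro heq
        rw [beq_iff_eq, heq, String.ofList_toList]
      · intro heq
        have := congrArg String.toList (beq_iff_eq.mp heq)
        simpa using this
    have hsw1 := hsw "docs" (by decide)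
    have hsw2 := hsw ".github" (by decide)
    have hsw1' : PySem.Str.startswith fp "docs/" = (String.ofList (fp.toList.takeWhile (fun c => c ≠ '/')) == "docs") := hsw1
    have hsw2' : PySem.Str.startswith fp ".github/" = (String.ofList (fp.toList.takeWhile (fun c => c ≠ '/')) == ".github") := hsw2
    -- basename of the whole path = basename of the tail after the first '/'
    have hbn : pvBasename fp
        = String.ofList ((tl.reverse.takeWhile (fun c => c ≠ '/')).reverse) := by
      unfold pvBasename
      congr 2
      conv_lhs => rw [hsplit]
      rw [List.reverse_append, List.reverse_cons, List.append_assoc]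
      exact pv_tw_sep _ (by simp) _ _
    simp only [pv_lastSegmentIn_eq, hsw1', hsw2', hbn]
    rw [pv_contains5, pv_contains2]
    generalize (String.ofList ((tl.reverse.takeWhile (fun c => c ≠ '/')).reverse) == "README.md") = b1
    generalize (String.ofList ((tl.reverse.takeWhile (fun c => c ≠ '/')).reverse) == "CHANGELOG.md") = b2
    generalize (String.ofList ((tl.reverse.takeWhile (fun c => c ≠ '/')).reverse) == ".gitignore") = b3
    generalize (String.ofList ((tl.reverse.takeWhile (fun c => c ≠ '/')).reverse) == "LICENSE") = b4
    generalize (String.ofList ((tl.reverse.takeWhile (fun c => c ≠ '/')).reverse) == "CLAUDE.md") = b5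
    generalize (String.ofList (fp.toList.takeWhile (fun c => c ≠ '/')) == "docs") = c1
    generalize (String.ofList (fp.toList.takeWhile (fun c => c ≠ '/')) == ".github") = c2
    revert b1 b2 b3 b4 b5 c1 c2
    decide
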